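-- pv_equiv track=rewrite | github.com/bigmike9000/hyperuniformity | scripts/metallic_mean_n500.py | generate_metallic_sequence
-- ===== SOURCE A (Python) =====
-- def generate_metallic_sequence(n, target_n):
--     rules = {'S': 'L', 'L': 'L' * n + 'S'}
--     seq = 'L'
--     iters = 0
--     while len(seq) < target_n:
--         seq = ''.join(rules[ch] for ch in seq)
--         iters += 1
--         if iters > 200:
--             break
--     return seq, iters
-- ===== SOURCE B (Python) =====
-- def generate_metallic_sequence(n, target_n):
--     k = max(n, 0)  # 'L' * n yields k copies
--     # phase 1: evolve only the (L-count, S-count) pair under the same stopping rule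
--     countL, countS = 1, 0
--     iters = 0
--     while countL + countS < target_n:
--         countL, countS = countL * k + countS, countL
--         iters += 1
--         if iters > 200:
--             break
--     # phase 2: bottom-up, expL/expS = full expansion of 'L'/'S' to depth d
--     expL, expS = 'L', 'S'
--     for _ in range(iters):
--         expL, expS = expL * k + expS, expL
--     return expL, iters
-- ===== Notes on version B (the rewrite author's own statement) =====
-- stated objective: alternative
-- what changed: Replaces the breadth-first whole-string rewrite loop with a counting pass that evolves only the (L-count, S-count) pair to determine the iteration count, followed by a depth-first recursive expansion that builds the final string directly from a single 'L'.
import Mathlib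
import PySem

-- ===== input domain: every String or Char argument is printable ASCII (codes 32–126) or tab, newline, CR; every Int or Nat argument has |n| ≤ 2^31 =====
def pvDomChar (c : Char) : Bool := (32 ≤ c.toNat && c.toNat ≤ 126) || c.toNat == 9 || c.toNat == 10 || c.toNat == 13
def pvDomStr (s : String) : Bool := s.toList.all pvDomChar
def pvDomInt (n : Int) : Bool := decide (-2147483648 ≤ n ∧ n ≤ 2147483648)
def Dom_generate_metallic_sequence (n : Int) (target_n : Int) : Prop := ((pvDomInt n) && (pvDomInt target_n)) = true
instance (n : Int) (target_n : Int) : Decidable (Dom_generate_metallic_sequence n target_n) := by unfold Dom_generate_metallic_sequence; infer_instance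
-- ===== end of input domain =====

-- B replaces A's whole-string rewrite loop by a count-pair loop (to get iters) plus a
-- depth-first recursive expansion of 'L' to that depth; same return value, similar cost.

-- ===== PORT A =====
-- rules[ch]: dict lookup; seq only ever contains 'L'/'S', so no KeyError is reachable.
-- 'L' * n with int n: n.toNat copies (Python's * clamps at 0).
def pvRulesA (n : Int) (ch : Char) : List Char :=
  if ch == 'S' then ['L'] else List.replicate n.toNat 'L' ++ ['S']

-- ''.join(rules[ch] for ch in seq)
def pvStepA (n : Int) (s : List Char) : List Char :=
  s.flatMap (pvRulesA n)

-- the while loop of A: state (seq, iters)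
def pvLoopA (n target : Int) (s : List Char) (iters : Int) : List Char × Int :=
  if (s.length : Int) < target then
    if iters + 1 > 200 then (pvStepA n s, iters + 1)
    else pvLoopA n target (pvStepA n s) (iters + 1)
  else (s, iters)
termination_by (201 - iters).toNat
decreasing_by simp_wf; omega

def generate_metallic_sequence (n : Int) (target_n : Int) : String × Int :=
  let r := pvLoopA n target_n ['L'] 0
  (String.ofList r.1, r.2)

-- ===== PORT B =====
-- phase 1: the counting while loop; returns iters
def pvLoopB (n target cL cS iters : Int) : Int :=
  if cL + cS < target then
    if iters + 1 > 200 then iters + 1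
    else pvLoopB n target (cL * max n 0 + cS) cL (iters + 1)
  else iters
termination_by (201 - iters).toNat
decreasing_by simp_wf; omega

-- phase 2: the for loop over range(iters); state (expL, expS); s * k is k copies of s
def pvIterB (n : Int) : Nat → List Char × List Char
  | 0 => (['L'], ['S'])
  | d + 1 =>
      let p := pvIterB n d
      ((List.replicate (max n 0).toNat p.1).flatten ++ p.2, p.1)

def generate_metallic_sequence_alt (n : Int) (target_n : Int) : String × Int :=
  let iters := pvLoopB n target_n 1 0 0
  (String.ofList (pvIterB n iters.toNat).1, iters)

-- ===== PRECONDITION & SPEC =====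
def Spec_generate_metallic_sequence (n : Int) (target_n : Int) (out : String × Int) : Prop := out = generate_metallic_sequence_alt n target_n
instance (n : Int) (target_n : Int) (out : String × Int) : Decidable (Spec_generate_metallic_sequence n target_n out) := by unfold Spec_generate_metallic_sequence; infer_instance

-- ===== CLAIM (what is proved, stated in full; the proofs are below) =====
def Claim_equal_generate_metallic_sequence : Prop := ∀ (n : Int) (target_n : Int), Dom_generate_metallic_sequence n target_n → Spec_generate_metallic_sequence n target_n (generate_metallic_sequence n target_n)

-- ===== LEMMAS AND PROOFS =====

def pvOnlyLS (s : List Char) : Prop := ∀ c ∈ s, c = 'L' ∨ c = 'S'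

-- proof-side: per-character depth-d expansion and its rules
def pvRulesB (n : Int) (ch : Char) : List Char :=
  if ch == 'S' then ['L'] else List.replicate (max n 0).toNat 'L' ++ ['S']

def pvExpand (n : Int) (ch : Char) : Nat → List Char
  | 0 => [ch]
  | d + 1 => (pvRulesB n ch).flatMap (fun c => pvExpand n c d)

theorem pvIterB_eq (n : Int) (d : Nat) :
    pvIterB n d = (pvExpand n 'L' d, pvExpand n 'S' d) := by
  induction d with
  | zero => rfl
  | succ d ih =>
      simp only [pvIterB, ih, pvExpand, pvRulesB]
      simp [List.flatMap_def, List.map_replicate]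

def pvExpandL (n : Int) (s : List Char) (d : Nat) : List Char :=
  s.flatMap (fun c => pvExpand n c d)

theorem pvRules_eq (n : Int) (ch : Char) : pvRulesA n ch = pvRulesB n ch := by
  unfold pvRulesA pvRulesB
  have h : (max n 0).toNat = n.toNat := by omega
  rw [h]

theorem pvExpandL_zero (n : Int) (s : List Char) : pvExpandL n s 0 = s := by
  simp [pvExpandL, pvExpand]

theorem pvExpandL_succ (n : Int) (s : List Char) (d : Nat) :
    pvExpandL n s (d + 1) = pvExpandL n (pvStepA n s) d := by
  simp only [pvExpandL, pvStepA, pvExpand, List.flatMap_def]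
  induction s with
  | nil => simp
  | cons c t ih =>
      simp only [List.map_cons, List.flatten_cons, List.map_append, List.flatten_append,
        ← ih, pvRules_eq]

theorem pvStepA_onlyLS (n : Int) (s : List Char) : pvOnlyLS (pvStepA n s) := by
  intro c hc
  simp only [pvStepA, List.mem_flatMap] at hc
  obtain ⟨a, _, hc⟩ := hc
  unfold pvRulesA at hc
  split at hc
  · simp at hc; exact Or.inl hc
  · rcases List.mem_append.mp hc with h2 | h2
    · exact Or.inl (List.eq_of_mem_replicate h2)
    · simp at h2; exact Or.inr h2

theorem pvLen_eq (s : List Char) (h : pvOnlyLS s) :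
    s.length = s.count 'L' + s.count 'S' := by
  induction s with
  | nil => simp
  | cons c t ih =>
      have hc := h c (List.mem_cons_self ..)
      have ht := ih (fun x hx => h x (List.mem_cons_of_mem _ hx))
      rcases hc with rfl | rfl <;> simp [ht] <;> omega

theorem pvStep_countL (n : Int) (s : List Char) (h : pvOnlyLS s) :
    ((pvStepA n s).count 'L' : Int) = (s.count 'L' : Int) * max n 0 + (s.count 'S' : Int) := by
  induction s with
  | nil => simp [pvStepA]
  | cons c t ih =>
      have hc := h c (List.mem_cons_self ..)
      have ht := ih (fun x hx => h x (List.mem_cons_of_mem _ hx))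
      have hstep : pvStepA n (c :: t) = pvRulesA n c ++ pvStepA n t := by
        simp [pvStepA]
      rcases hc with rfl | rfl
      · rw [hstep]
        simp [pvRulesA, List.count_append]
        rw [ht]; ring
      · rw [hstep]
        simp [pvRulesA]
        rw [ht]; ring

theorem pvStep_countS (n : Int) (s : List Char) (h : pvOnlyLS s) :
    (pvStepA n s).count 'S' = s.count 'L' := by
  induction s with
  | nil => simp [pvStepA]
  | cons c t ih =>
      have hc := h c (List.mem_cons_self ..)
      have ht := ih (fun x hx => h x (List.mem_cons_of_mem _ hx))
      have hstep : pvStepA n (c :: t) = pvRulesA n c ++ pvStepA n t := by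
        simp [pvStepA]
      rcases hc with rfl | rfl <;>
        simp [hstep, List.count_append, pvRulesA, List.count_replicate, ht]

theorem pvLoopB_ge (n target cL cS iters : Int) : iters ≤ pvLoopB n target cL cS iters := by
  unfold pvLoopB
  split
  · split
    · omega
    · have := pvLoopB_ge n target (cL * max n 0 + cS) cL (iters + 1)
      omega
  · omega
termination_by (201 - iters).toNat
decreasing_by simp_wf; omega

theorem pvLoopA_eq (n target : Int) (s : List Char) (iters : Int) (h : pvOnlyLS s) :
    pvLoopA n target s iters =
      (pvExpandL n s ((pvLoopB n target (s.count 'L') (s.count 'S') iters) - iters).toNat,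
       pvLoopB n target (s.count 'L') (s.count 'S') iters) := by
  rw [pvLoopA, pvLoopB]
  have hlen : ((s.length : Int) < target) ↔ ((s.count 'L' : Int) + (s.count 'S' : Int) < target) := by
    rw [pvLen_eq s h]; push_cast; omega
  by_cases hg : (s.length : Int) < target
  · rw [if_pos hg, if_pos (hlen.mp hg)]
    by_cases hb : iters + 1 > 200
    · rw [if_pos hb, if_pos hb]
      rw [show (iters + 1 - iters).toNat = 1 by omega, pvExpandL_succ, pvExpandL_zero]
    · rw [if_neg hb, if_neg hb]
      have hrec := pvLoopA_eq n target (pvStepA n s) (iters + 1) (pvStepA_onlyLS n s)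
      rw [hrec]
      have hcL := pvStep_countL n s h
      have hcS := pvStep_countS n s h
      have hcS' : ((pvStepA n s).count 'S' : Int) = (s.count 'L' : Int) := by
        exact_mod_cast hcS
      rw [show ((pvStepA n s).count 'L' : Int) = (s.count 'L' : Int) * max n 0 + (s.count 'S' : Int) from hcL,
          hcS']
      set r := pvLoopB n target ((s.count 'L' : Int) * max n 0 + (s.count 'S' : Int)) (s.count 'L') (iters + 1) with hr
      have hge : iters + 1 ≤ r := pvLoopB_ge ..
      have : (r - iters).toNat = (r - (iters + 1)).toNat + 1 := by omega
      rw [this, pvExpandL_succ]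
  · rw [if_neg hg, if_neg (fun hc => hg (hlen.mpr hc))]
    rw [show (iters - iters).toNat = 0 by omega, pvExpandL_zero]
termination_by (201 - iters).toNat
decreasing_by simp_wf; omega

-- ===== VERDICT (by name: the statement is the Claim_ definition above) =====
theorem generate_metallic_sequence_spec : Claim_equal_generate_metallic_sequence := by
  intro n target_n _
  unfold Spec_generate_metallic_sequence generate_metallic_sequence generate_metallic_sequence_alt
  have h : pvOnlyLS ['L'] := by intro c hc; simp at hc; exact Or.inl hc
  rw [pvLoopA_eq n target_n ['L'] 0 h]
  simp only [List.count_cons, List.count_nil]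
  norm_num
  rw [show pvExpandL n ['L'] (pvLoopB n target_n 1 0 0).toNat
        = (pvIterB n (pvLoopB n target_n 1 0 0).toNat).1 by
      rw [pvIterB_eq]; simp [pvExpandL]]
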